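-- pv_equiv track=rewrite | github.com/ACFHarbinger/WSmartPlus-Route | logic/src/policies/look_ahead_aux/sans_neighborhoods.py | insert_bin_in_route
-- ===== SOURCE A (Python) =====
-- def insert_bin_in_route(route: list, bin_id: int, id_to_index: dict, distance_matrix) -> list:
--     """
--     Insert a bin into a route at the position minimizing cost increase.
--
--     Args:
--         route: Current route.
--         bin_id: Bin to insert.
--         id_to_index: Mapping from bin ID to matrix index.
--         distance_matrix: Distance matrix.
--
--     Returns:
--         New route with the inserted bin.
--     """
--     best_route = route[:]
--     best_increase = float("inf")
--
--     # Start and end positions for insertion (between depots)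
--     for i in range(1, len(route)):
--         prev_node = route[i - 1]
--         next_node = route[i]
--
--         idx_prev = id_to_index.get(prev_node, prev_node)
--         idx_next = id_to_index.get(next_node, next_node)
--         idx_bin = id_to_index.get(bin_id, bin_id)
--
--         try:
--             increase = (
--                 distance_matrix[idx_prev][idx_bin]
--                 + distance_matrix[idx_bin][idx_next]
--                 - distance_matrix[idx_prev][idx_next]
--             )
--         except (IndexError, TypeError):
--             continue
--
--         if increase < best_increase:
--             best_increase = increase
--             best_route = route[:i] + [bin_id] + route[i:]
--
--     return best_route
-- ===== SOURCE B (Python) =====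
-- def _detour(dm, p, b, q):
--     """Detour cost of visiting b between matrix rows p and q; None if indices invalid."""
--     try:
--         return dm[p][b] + dm[b][q] - dm[p][q]
--     except (IndexError, TypeError):
--         return None
--
--
-- def insert_bin_in_route(route: list, bin_id: int, id_to_index: dict, distance_matrix) -> list:
--     look = lambda v: id_to_index.get(v, v)
--     b = look(bin_id)
--     # cost table over adjacent pairs; None marks an invalid gap
--     raw = [(_detour(distance_matrix, look(u), b, look(v)), i)
--            for i, (u, v) in enumerate(zip(route, route[1:]), 1)]
--     # keep valid gaps, stable-sort by cost; head of the sort is the winning gap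
--     candidates = sorted([(c, i) for c, i in raw if c is not None],
--                         key=lambda t: t[0])
--     if not candidates:
--         return route[:]
--     i = candidates[0][1]
--     return route[:i] + [bin_id] + route[i:]
-- ===== Notes on version B (the rewrite author's own statement) =====
-- stated objective: alternative
-- what changed: B replaces A's fused scan-and-track loop (running best_increase/best_route with repeated route rebuilds) by a staged pipeline: a cost table over enumerate(zip(route, route[1:])), a filter of the valid gaps, a stable sort by cost whose head is the winning gap (first-min tie-breaking comes from sort stability), and one final splice.
import Mathlib
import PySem

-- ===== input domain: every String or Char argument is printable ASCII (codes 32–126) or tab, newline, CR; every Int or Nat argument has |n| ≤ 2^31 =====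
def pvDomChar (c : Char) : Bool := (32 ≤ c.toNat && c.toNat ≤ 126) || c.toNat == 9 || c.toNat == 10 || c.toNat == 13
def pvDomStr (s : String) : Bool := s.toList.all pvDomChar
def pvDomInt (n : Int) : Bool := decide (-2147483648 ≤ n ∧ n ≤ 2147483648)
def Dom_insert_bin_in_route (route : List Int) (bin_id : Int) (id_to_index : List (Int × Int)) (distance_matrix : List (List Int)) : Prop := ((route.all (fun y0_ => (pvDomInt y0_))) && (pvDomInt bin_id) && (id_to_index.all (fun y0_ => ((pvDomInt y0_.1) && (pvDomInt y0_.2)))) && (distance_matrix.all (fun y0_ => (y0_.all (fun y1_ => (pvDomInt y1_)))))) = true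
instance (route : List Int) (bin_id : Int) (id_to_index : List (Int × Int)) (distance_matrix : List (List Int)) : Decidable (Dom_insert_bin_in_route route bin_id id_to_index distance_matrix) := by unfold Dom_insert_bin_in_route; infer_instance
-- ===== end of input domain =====

-- B replaces A's fused scan-and-track loop by a staged pipeline (cost table over
-- zipped adjacent pairs, filter, stable sort by cost, one splice at the sort's head);
-- alternative decomposition, same results.

-- ===== PORT A =====
-- one iteration of A's loop; state = (best_route, best_increase) with none = float('inf')
def pvAStep (route : List Int) (bin_id : Int) (id_to_index : List (Int × Int)) (distance_matrix : List (List Int)) (st : List Int × Option Int) (i : Int) : List Int × Option Int :=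
  let prev_node := (PySem.List.pyGet? route (i - 1)).getD 0   -- i ∈ range(1, len): in range, so getD is exact
  let next_node := (PySem.List.pyGet? route i).getD 0
  let idx_prev := (PySem.Dict.ofList id_to_index).getD prev_node prev_node
  let idx_next := (PySem.Dict.ofList id_to_index).getD next_node next_node
  let idx_bin := (PySem.Dict.ofList id_to_index).getD bin_id bin_id
  -- try block: none = IndexError (TypeError impossible on List (List Int))
  match (PySem.List.pyGet? distance_matrix idx_prev).bind (fun r => PySem.List.pyGet? r idx_bin),
        (PySem.List.pyGet? distance_matrix idx_bin).bind (fun r => PySem.List.pyGet? r idx_next),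
        (PySem.List.pyGet? distance_matrix idx_prev).bind (fun r => PySem.List.pyGet? r idx_next) with
  | some d1, some d2, some d3 =>
      let increase := d1 + d2 - d3
      if (match st.2 with | none => true | some best => increase < best) then
        (PySem.List.slice route none (some i) ++ [bin_id] ++ PySem.List.slice route (some i) none, some increase)
      else st
  | _, _, _ => st

def insert_bin_in_route (route : List Int) (bin_id : Int) (id_to_index : List (Int × Int)) (distance_matrix : List (List Int)) : List Int :=
  ((PySem.List.pyRange 1 (route.length : Int) 1).foldl
    (pvAStep route bin_id id_to_index distance_matrix) (route, none)).1

-- ===== PORT B =====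
-- _detour: detour cost dm[p][b] + dm[b][q] - dm[p][q]; none = None (invalid indices)
def pvDetour (dm : List (List Int)) (p b q : Int) : Option Int :=
  match (PySem.List.pyGet? dm p).bind (fun r => PySem.List.pyGet? r b),
        (PySem.List.pyGet? dm b).bind (fun r => PySem.List.pyGet? r q),
        (PySem.List.pyGet? dm p).bind (fun r => PySem.List.pyGet? r q) with
  | some d1, some d2, some d3 => some (d1 + d2 - d3)
  | _, _, _ => none

def insert_bin_in_route_alt (route : List Int) (bin_id : Int) (id_to_index : List (Int × Int)) (distance_matrix : List (List Int)) : List Int :=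
  let look := fun v : Int => (PySem.Dict.ofList id_to_index).getD v v
  let b := look bin_id
  -- raw = [(_detour(...), i) for i, (u, v) in enumerate(zip(route, route[1:]), 1)]
  let raw := (PySem.List.enumerate (route.zip (PySem.List.slice route (some 1) none)) 1).map
      (fun p => (pvDetour distance_matrix (look p.2.1) b (look p.2.2), p.1))
  -- candidates = sorted([(c, i) for c, i in raw if c is not None], key=lambda t: t[0])
  let candidates := PySem.List.sorted
      (raw.filterMap (fun ci => ci.1.map (fun c => (c, ci.2)))) (fun t => t.1) false
  match candidates with
  | [] => route
  | (_, i) :: _ => PySem.List.slice route none (some i) ++ [bin_id] ++ PySem.List.slice route (some i) none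

-- ===== PRECONDITION & SPEC =====
def Spec_insert_bin_in_route (route : List Int) (bin_id : Int) (id_to_index : List (Int × Int)) (distance_matrix : List (List Int)) (out : List Int) : Prop := out = insert_bin_in_route_alt route bin_id id_to_index distance_matrix
instance (route : List Int) (bin_id : Int) (id_to_index : List (Int × Int)) (distance_matrix : List (List Int)) (out : List Int) : Decidable (Spec_insert_bin_in_route route bin_id id_to_index distance_matrix out) := by unfold Spec_insert_bin_in_route; infer_instance

-- ===== CLAIM =====
def Claim_equal_insert_bin_in_route : Prop := ∀ (route : List Int) (bin_id : Int) (id_to_index : List (Int × Int)) (distance_matrix : List (List Int)), Dom_insert_bin_in_route route bin_id id_to_index distance_matrix → Spec_insert_bin_in_route route bin_id id_to_index distance_matrix (insert_bin_in_route route bin_id id_to_index distance_matrix)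

-- ===== LEMMAS AND PROOFS =====

-- gap cost of inserting at position i, expressed through B's _detour; none = invalid gap
def pvGapCost (route : List Int) (bin_id : Int) (d : List (Int × Int)) (dm : List (List Int)) (i : Int) : Option Int :=
  let look := fun v : Int => (PySem.Dict.ofList d).getD v v
  pvDetour dm (look ((PySem.List.pyGet? route (i - 1)).getD 0)) (look bin_id)
    (look ((PySem.List.pyGet? route i).getD 0))

-- the head-tracking step: what one stable-insertion of x does to the eventual head
def pvStepH (h : Option (Int × Int)) (x : Int × Int) : Option (Int × Int) :=
  some (match h with | none => x | some y => if x.1 < y.1 then x else y)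

-- one gap folded into the tracked best: skip invalid gaps, otherwise pvStepH
def pvStepG (route : List Int) (bin_id : Int) (d : List (Int × Int)) (dm : List (List Int)) (hh : Option (Int × Int)) (i : Int) : Option (Int × Int) :=
  match pvGapCost route bin_id d dm i with
  | none => hh
  | some c => pvStepH hh (c, i)

-- interpretation of a tracked best gap as a route
def pvRender (route : List Int) (bin_id : Int) (bi : Option Int) : List Int :=
  match bi with
  | none => route
  | some i => PySem.List.slice route none (some i) ++ [bin_id] ++ PySem.List.slice route (some i) none

-- reshaping a 3-way Option match into 'compute the cost, then match it'
lemma pvOpt3Match {α : Type} (a b c : Option Int) (h : Int → α) (dflt : α) :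
    (match a, b, c with
     | some x, some y, some z => h (x + y - z)
     | _, _, _ => dflt) =
    (match (match a, b, c with
            | some x, some y, some z => some (x + y - z)
            | _, _, _ => none) with
     | none => dflt
     | some inc => h inc) := by
  cases a <;> cases b <;> cases c <;> rfl

-- A's step rephrased through the shared gap-cost function
lemma pvAStep_eq (route : List Int) (bin_id : Int) (d : List (Int × Int)) (dm : List (List Int))
    (st : List Int × Option Int) (i : Int) :
    pvAStep route bin_id d dm st i =
      match pvGapCost route bin_id d dm i with
      | none => st
      | some inc =>
          if (match st.2 with | none => true | some best => inc < best) then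
            (PySem.List.slice route none (some i) ++ [bin_id] ++ PySem.List.slice route (some i) none, some inc)
          else st := by
  unfold pvAStep pvGapCost pvDetour
  exact pvOpt3Match _ _ _
    (fun inc =>
      if (match st.2 with | none => true | some best => decide (inc < best)) = true then
        (PySem.List.slice route none (some i) ++ [bin_id] ++ PySem.List.slice route (some i) none, some inc)
      else st) st

-- head of one stable insertion
lemma pvHead_insertBy (x : Int × Int) (acc : List (Int × Int)) :
    (PySem.List.insertBy (fun a b => decide (a.1 < b.1)) x acc).head? = pvStepH acc.head? x := by
  cases acc with
  | nil => simp [PySem.List.insertBy, pvStepH]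
  | cons y ys => by_cases h : x.1 < y.1 <;> simp [PySem.List.insertBy, pvStepH, h]

-- head of the whole insertion sort = fold of pvStepH
lemma pvHead_foldl_insertBy (C : List (Int × Int)) :
    ∀ acc : List (Int × Int),
      (C.foldl (fun acc x => PySem.List.insertBy (fun a b => decide (a.1 < b.1)) x acc) acc).head? =
        C.foldl pvStepH acc.head? := by
  induction C with
  | nil => intro acc; rfl
  | cons x C ih =>
      intro acc
      simp only [List.foldl_cons]
      rw [ih, pvHead_insertBy]

lemma pvHead_sorted (C : List (Int × Int)) :
    (PySem.List.sorted C (fun t => t.1) false).head? = C.foldl pvStepH none := by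
  rw [PySem.List.sorted_eq_foldl_insertBy, pvHead_foldl_insertBy]
  rfl

-- A's fused loop equals the head-tracking fold, rendered
lemma pvLoop (route : List Int) (bin_id : Int) (d : List (Int × Int)) (dm : List (List Int)) :
    ∀ (L : List Int) (stA : List Int × Option Int) (h : Option (Int × Int)),
      stA.2 = h.map (fun y => y.1) → stA.1 = pvRender route bin_id (h.map (fun y => y.2)) →
      (L.foldl (pvAStep route bin_id d dm) stA).1 =
        pvRender route bin_id
          ((L.foldl (pvStepG route bin_id d dm) h).map (fun y => y.2)) := by
  intro L
  induction L with
  | nil => intro stA h h2 h1; simpa using h1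
  | cons i L ih =>
      intro stA h h2 h1
      simp only [List.foldl_cons, pvAStep_eq, pvStepG]
      rcases hc : pvGapCost route bin_id d dm i with _ | inc
      · exact ih stA h h2 h1
      · rcases hb : h with _ | ⟨bc, bi⟩
        · subst hb
          simp only [Option.map_none] at h2
          simp only [h2]
          apply ih
          · simp [pvStepH]
          · simp [pvStepH, pvRender]
        · subst hb
          simp only [Option.map_some] at h2
          simp only [h2]
          by_cases hlt : inc < bc
          · simp only [hlt, decide_true, if_pos]
            apply ih
            · simp [pvStepH, hlt]
            · simp [pvStepH, hlt, pvRender]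
          · simp only [hlt, decide_false, if_neg, Bool.false_eq_true, not_false_eq_true]
            apply ih
            · simp [pvStepH, hlt, h2]
            · simpa [pvStepH, hlt] using h1

-- folding pvStepH over the filtered candidates = folding pvStepG over the raw gaps
lemma pvFoldl_filterMap (route : List Int) (bin_id : Int) (d : List (Int × Int)) (dm : List (List Int)) (R : List Int) :
    ∀ init : Option (Int × Int),
      ((R.filterMap (fun i => (pvGapCost route bin_id d dm i).map (fun c => (c, i)))).foldl pvStepH init)
        = R.foldl (pvStepG route bin_id d dm) init := by
  induction R with
  | nil => intro init; rfl
  | cons i R ih =>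
      intro init
      rcases hc : pvGapCost route bin_id d dm i with _ | c <;>
        simp [hc, pvStepG, ih]

-- the enumerate-zip cost table is the gap table over range(1, len(route))
lemma pvRaw_eq (route : List Int) (bin_id : Int) (d : List (Int × Int)) (dm : List (List Int)) :
    ((PySem.List.enumerate (route.zip (PySem.List.slice route (some 1) none)) 1).map
      (fun p => (pvDetour dm ((PySem.Dict.ofList d).getD p.2.1 p.2.1)
                  ((PySem.Dict.ofList d).getD bin_id bin_id)
                  ((PySem.Dict.ofList d).getD p.2.2 p.2.2), p.1))) =
      (PySem.List.pyRange 1 (route.length : Int) 1).map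
        (fun i => (pvGapCost route bin_id d dm i, i)) := by
  rw [PySem.List.slice_from route (by norm_num : (0:Int) ≤ 1)]
  rw [PySem.List.pyRange_of_pos 1 (route.length : Int) (by norm_num)]
  have hm : (if (1:Int) < (route.length : Int)
      then (((route.length : Int) - 1 + 1 - 1) / 1).toNat else 0) = route.length - 1 := by
    split <;> omega
  rw [hm, List.map_map, Int.toNat_one]
  apply List.ext_getElem?
  intro k
  by_cases hk : k < route.length - 1
  · have h1 : k < route.length := by omega
    have h2 : k + 1 < route.length := by omega
    have hzk : k < (route.zip (List.drop 1 route)).length := by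
      simp only [List.length_zip, List.length_drop]; omega
    have e1 : PySem.List.pyGet? route (1 + (k : Int) - 1) = some route[k] := by
      have he : (1 + (k : Int) - 1) = ((k : Nat) : Int) := by omega
      rw [he, PySem.List.pyGet?_natCast, List.getElem?_eq_getElem h1]
    have e2 : PySem.List.pyGet? route (1 + (k : Int)) = some route[k+1] := by
      have he : (1 + (k : Int)) = (((k + 1 : Nat)) : Int) := by omega
      rw [he, PySem.List.pyGet?_natCast, List.getElem?_eq_getElem h2]
    simp only [PySem.List.getElem?_enumerate, List.getElem?_map, List.getElem?_range,
      List.getElem?_eq_getElem hzk, List.getElem_zip, Option.map_some, hk,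
      Function.comp, one_mul, pvGapCost, e1, e2, Option.getD_some]
    rw [List.getElem_drop]
    simp [Nat.add_comm]
  · have hz : (route.zip (List.drop 1 route)).length ≤ k := by
      simp only [List.length_zip, List.length_drop]; omega
    simp [hk]

-- ===== VERDICT =====
theorem insert_bin_in_route_spec : Claim_equal_insert_bin_in_route := by
  intro route bin_id d dm _
  unfold Spec_insert_bin_in_route insert_bin_in_route
  rw [pvLoop route bin_id d dm _ (route, none) none rfl rfl]
  simp only [insert_bin_in_route_alt]
  rw [pvRaw_eq route bin_id d dm, List.filterMap_map]
  have hcomp : ((fun ci : Option Int × Int => ci.1.map (fun c => (c, ci.2))) ∘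
      (fun i : Int => (pvGapCost route bin_id d dm i, i))) =
      (fun i : Int => (pvGapCost route bin_id d dm i).map (fun c => (c, i))) := rfl
  rw [hcomp]
  have hsortedhead := pvHead_sorted ((PySem.List.pyRange 1 (route.length : Int) 1).filterMap
      (fun i => (pvGapCost route bin_id d dm i).map (fun c => (c, i))))
  rw [pvFoldl_filterMap route bin_id d dm] at hsortedhead
  rcases hS : PySem.List.sorted ((PySem.List.pyRange 1 (route.length : Int) 1).filterMap
      (fun i => (pvGapCost route bin_id d dm i).map (fun c => (c, i)))) (fun t => t.1) false
    with _ | ⟨⟨c, i⟩, t⟩ <;>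
    rw [hS] at hsortedhead <;>
    simp only [List.head?_nil, List.head?_cons] at hsortedhead <;>
    rw [← hsortedhead] <;> rfl
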